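-- pv_equiv track=rewrite | github.com/joshivikash/firstpythonrepo | week6/mock3.py | busy_cities
-- ===== SOURCE A (Python) =====
-- def group_by_city(scores_dataset):
--   """
--   Group students by cities
--
--   Argument:
--       scores_dataset: list of dicts
--   Return:
--       cities: dict: (key: string, value: list of strings)
--   """
--   cities = {}
--   for data in scores_dataset:
--     city = data['City']
--     if city not in cities:
--       cities[city] = []
--     cities[city].append(data['Name'])
--   return cities
--
-- def busy_cities(scores_dataset):
--   """
--   Get the busy cities
--
--   Argument:
--       scores_dataset: list of dicts
--   Return:
--       result: list of strings
--   """
--   cities = group_by_city(scores_dataset)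
--   result = []
--   population = 0
--   for city, names in cities.items():
--     if len(names) > population:
--       result = [city]
--       population = len(names)
--     elif len(names) == population:
--       result.append(city)
--   return result
-- ===== SOURCE B (Python) =====
-- def busy_cities(scores_dataset):
--     """Get the busy cities (cities with the maximum number of students)."""
--     cities = [data['City'] for data in scores_dataset]
--     if not cities:
--         return []
--     m = max(cities.count(c) for c in cities)
--     return [c for i, c in enumerate(cities) if cities.index(c) == i and cities.count(c) == m]
-- ===== Notes on version B (the rewrite author's own statement) =====
-- stated objective: alternative
-- what changed: B builds no grouping table at all: it extracts the flat city list, takes m = max of per-occurrence cities.count(c), and emits first occurrences (cities.index(c) == i) whose count equals m - brute-force counting plus index-dedup instead of A's dict-of-name-lists with a running-max/tie-accumulation loop.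
-- crash fix: On inputs where every record has a 'City' key but some record lacks 'Name', A raises KeyError while B never reads 'Name' and returns the busiest cities. — e.g. on busy_cities([[("City", "x")]]): A raises KeyError, B returns ["x"]
import Mathlib
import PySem

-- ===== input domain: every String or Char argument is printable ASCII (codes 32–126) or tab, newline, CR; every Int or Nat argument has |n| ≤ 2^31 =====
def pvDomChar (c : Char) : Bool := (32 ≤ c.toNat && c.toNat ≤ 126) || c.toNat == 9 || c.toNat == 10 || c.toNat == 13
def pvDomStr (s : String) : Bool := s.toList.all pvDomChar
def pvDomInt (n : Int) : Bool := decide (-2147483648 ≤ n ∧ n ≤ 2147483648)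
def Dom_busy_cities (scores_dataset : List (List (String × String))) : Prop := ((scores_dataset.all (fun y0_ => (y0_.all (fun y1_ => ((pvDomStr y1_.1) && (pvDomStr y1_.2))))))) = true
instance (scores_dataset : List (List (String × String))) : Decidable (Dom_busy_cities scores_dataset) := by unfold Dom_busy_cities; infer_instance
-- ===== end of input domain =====

-- B drops A's grouping dict and running-max/tie loop entirely: it works on the flat city list with
-- brute-force cities.count plus first-occurrence dedup via cities.index (objective: alternative,
-- O(n^2) vs A's O(n)); return values only.

-- ===== PORT A =====
-- one step of group_by_city's loop: setdefault-style insert, then append the name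
def pvGroupStep (cities : PySem.Dict String (List String)) (data : List (String × String)) : PySem.Dict String (List String) :=
  let city := (PySem.Dict.ofList data).getD "City" ""
  let cities' := if cities.contains city then cities else cities.insert city ([] : List String)
  cities'.modify city [] (fun names => names ++ [(PySem.Dict.ofList data).getD "Name" ""])

def group_by_city (scores_dataset : List (List (String × String))) : PySem.Dict String (List String) :=
  scores_dataset.foldl pvGroupStep PySem.Dict.empty

def busy_cities (scores_dataset : List (List (String × String))) : List String :=
  (List.foldl
    (fun (st : List String × Int) (p : String × List String) =>
      if (p.2.length : Int) > st.2 then ([p.1], (p.2.length : Int))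
      else if ((p.2.length : Int) == st.2) then (st.1 ++ [p.1], st.2)
      else st)
    (([] : List String), (0 : Int)) (group_by_city scores_dataset).items).1

-- ===== PORT B =====
def busy_cities_alt (scores_dataset : List (List (String × String))) : List String :=
  let cities := scores_dataset.map (fun data => (PySem.Dict.ofList data).getD "City" "")
  if cities.isEmpty then []
  else
    -- 'max(...)' on the nonempty generator; the none arm is unreachable (totality guard only)
    match PySem.List.max? (cities.map (fun c => (cities.count c : Int))) id with
    | none => []
    | some m =>
      ((PySem.List.enumerate cities).filter
        (fun p => ((PySem.List.index? cities p.2).map (fun k => (k : Int)) == some p.1)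
                  && ((cities.count p.2 : Int) == m))).map (fun p => p.2)

-- ===== PRECONDITION & SPEC =====
-- Pre_: every record must own both keys 'City' and 'Name'; Python A raises KeyError otherwise.
def Pre_busy_cities (scores_dataset : List (List (String × String))) : Prop :=
  ∀ rec ∈ scores_dataset, "City" ∈ rec.map Prod.fst ∧ "Name" ∈ rec.map Prod.fst
instance (scores_dataset : List (List (String × String))) : Decidable (Pre_busy_cities scores_dataset) := by unfold Pre_busy_cities; infer_instance

def pvWitness_busy_cities : (List (List (String × String))) := [[("City", "a"), ("Name", "n")]]

-- On inputs where every record has a 'City' key but some record lacks 'Name', A raises KeyError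
-- while B never reads 'Name' and returns the busiest cities.
def Raises_busy_cities (scores_dataset : List (List (String × String))) : Prop :=
  (∀ rec ∈ scores_dataset, "City" ∈ rec.map Prod.fst) ∧
  (∃ rec ∈ scores_dataset, "Name" ∉ rec.map Prod.fst)
instance (scores_dataset : List (List (String × String))) : Decidable (Raises_busy_cities scores_dataset) := by unfold Raises_busy_cities; infer_instance
def pvRaiseWitness_busy_cities : (List (List (String × String))) := [[("City", "x")]]
def pvRaiseWitnessOut_busy_cities : List String := ["x"]

def Spec_busy_cities (scores_dataset : List (List (String × String))) (out : List String) : Prop := out = busy_cities_alt scores_dataset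
instance (scores_dataset : List (List (String × String))) (out : List String) : Decidable (Spec_busy_cities scores_dataset out) := by unfold Spec_busy_cities; infer_instance

-- ===== CLAIM (what is proved, stated in full; the proofs are below) =====
def Claim_equal_busy_cities : Prop := ∀ (scores_dataset : List (List (String × String))), Dom_busy_cities scores_dataset → Pre_busy_cities scores_dataset → Spec_busy_cities scores_dataset (busy_cities scores_dataset)

def Claim_raises_busy_cities : Prop := (∀ (scores_dataset : List (List (String × String))), Dom_busy_cities scores_dataset → Raises_busy_cities scores_dataset → ¬ Pre_busy_cities scores_dataset) ∧ (Dom_busy_cities (pvRaiseWitness_busy_cities) ∧ Raises_busy_cities (pvRaiseWitness_busy_cities) ∧ busy_cities_alt (pvRaiseWitness_busy_cities) = pvRaiseWitnessOut_busy_cities)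

-- ===== LEMMAS AND PROOFS =====

-- A's loop step, on (city, count) pairs
def pvStep (st : List String × Int) (p : String × Int) : List String × Int :=
  if p.2 > st.2 then ([p.1], p.2)
  else if (p.2 == st.2) then (st.1 ++ [p.1], st.2)
  else st

-- running maximum of the counts, seeded with 0 (A's initial population)
def pvM (l : List (String × Int)) : Int := (l.map (fun p => p.2)).foldl max 0

def pvCity (data : List (String × String)) : String := (PySem.Dict.ofList data).getD "City" ""
def pvName (data : List (String × String)) : String := (PySem.Dict.ofList data).getD "Name" ""

-- the setdefault-style insert followed by modify is just modify with default []
theorem pvGroupStep_eq (d : PySem.Dict String (List String)) (data : List (String × String)) :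
    pvGroupStep d data = d.modify (pvCity data) [] (fun v => v ++ [pvName data]) := by
  unfold pvGroupStep pvCity pvName
  by_cases h : d.contains ((PySem.Dict.ofList data).getD "City" "") = true
  · simp [h]
  · simp only [Bool.not_eq_true] at h
    simp only [h, Bool.false_eq_true, if_false, PySem.Dict.modify]
    rw [PySem.Dict.getD_insert_self, PySem.Dict.insert_insert_self,
      PySem.Dict.getD_of_not_contains d _ h]

-- A's accumulation loop computes exactly "cities whose count is the maximum"
theorem pvLoop_eq (l : List (String × Int)) (hpos : ∀ p ∈ l, 0 < p.2) :
    l.foldl pvStep (([] : List String), (0 : Int)) =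
      ((l.filter (fun p => p.2 == pvM l)).map (fun p => p.1), pvM l) := by
  induction l using List.reverseRecOn with
  | nil => simp [pvM]
  | append_singleton l x ih =>
    have hl : ∀ p ∈ l, 0 < p.2 := fun p hp => hpos p (by simp [hp])
    have hM : pvM (l ++ [x]) = max (pvM l) x.2 := by
      simp [pvM, List.foldl_append]
    have hub : ∀ p ∈ l, p.2 ≤ pvM l := by
      intro p hp
      simpa [pvM] using (PySem.List.le_foldl_max (l.map (fun p => p.2)) 0).2 p.2 (List.mem_map_of_mem hp)
    rw [List.foldl_append, ih hl]
    simp only [List.foldl_cons, List.foldl_nil, List.filter_append, List.map_append, hM]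
    rcases lt_trichotomy (pvM l) x.2 with h | h | h
    · have hmax : max (pvM l) x.2 = x.2 := max_eq_right h.le
      have hnil : l.filter (fun p => p.2 == x.2) = [] := by
        rw [List.filter_eq_nil_iff]
        intro p hp
        simp only [beq_iff_eq]
        exact fun he => absurd (hub p hp) (by omega)
      simp [pvStep, h, hmax, hnil]
    · have hmax : max (pvM l) x.2 = pvM l := by omega
      simp [pvStep, ← h]
    · have hmax : max (pvM l) x.2 = pvM l := max_eq_left h.le
      have hne : (x.2 == pvM l) = false := by simp; omega
      simp [pvStep, hmax, not_lt.mpr h.le, hne]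

-- A's grouping dict, itemised: keys in first-appearance order, values the matching names
theorem pvGroup_items (sd : List (List (String × String))) :
    (group_by_city sd).items =
      (PySem.Set.ofList (sd.map pvCity)).map
        (fun k => (k, ((sd.map (fun d => (pvCity d, pvName d))).filter (fun p => p.1 == k)).map (fun p => p.2))) := by
  have hstep : group_by_city sd =
      (sd.map (fun d => (pvCity d, pvName d))).foldl
        (fun d p => d.modify p.1 [] (fun v => v ++ [p.2])) PySem.Dict.empty := by
    unfold group_by_city
    rw [List.foldl_map]
    exact PySem.List.foldl_congr_mem sd _ _ _ (fun d data _ => pvGroupStep_eq d data)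
  set pairs := sd.map (fun d => (pvCity d, pvName d)) with hpairs
  have hnd : ((pairs.foldl (fun d p => d.modify p.1 [] (fun v => v ++ [p.2])) PySem.Dict.empty).keys).Nodup :=
    PySem.Dict.nodup_keys_foldl_modify_key pairs Prod.fst [] (fun _ p v => v ++ [p.2])
      PySem.Dict.empty PySem.Dict.nodup_keys_empty
  rw [hstep, PySem.Dict.items_eq_map_keys _ hnd []]
  have hkeys : (pairs.foldl (fun d p => d.modify p.1 [] (fun v => v ++ [p.2])) PySem.Dict.empty).keys
      = PySem.Set.ofList (sd.map pvCity) := by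
    rw [PySem.Dict.keys_foldl_modify_key pairs Prod.fst [] (fun _ p v => v ++ [p.2]) PySem.Dict.empty]
    simp [PySem.Set.ofList, PySem.Set.update, PySem.Dict.keys_empty, PySem.Set.empty, hpairs,
      List.map_map, Function.comp_def]
  rw [hkeys]
  refine List.map_congr_left (fun k _ => ?_)
  rw [PySem.Dict.getD_foldl_modify_append pairs PySem.Dict.empty k, PySem.Dict.getD_empty]
  simp

-- Python max absorbs the head into the accumulator
theorem pvMaxCons (a v : Int) (t : List Int) :
    PySem.List.max? (a :: v :: t) id = PySem.List.max? (max a v :: t) id := by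
  simp only [PySem.List.max?, List.foldl_cons, id_eq]
  rcases lt_or_ge a v with h | h
  · rw [if_pos h, max_eq_right h.le]
  · rw [if_neg (not_lt.mpr h), max_eq_left h]

theorem pvMaxAux (rest : List Int) (a : Int) :
    PySem.List.max? (a :: rest) id = some (rest.foldl max a) := by
  induction rest generalizing a with
  | nil => rfl
  | cons v t ih => rw [pvMaxCons, ih]; rfl

-- Python max over a nonempty list with positive head is the 0-seeded running max
theorem pvMax?_pos (v : Int) (rest : List Int) (hv : 0 < v) :
    PySem.List.max? (v :: rest) id = some ((v :: rest).foldl max 0) := by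
  rw [pvMaxAux]
  simp [max_eq_right hv.le]

-- the 0-seeded running max is an upper-bound operator
theorem pvFoldlMax_le (l : List Int) (a b : Int) (ha : a ≤ b) (hl : ∀ x ∈ l, x ≤ b) :
    l.foldl max a ≤ b := by
  induction l generalizing a with
  | nil => exact ha
  | cons x t ih =>
    exact ih (max a x) (max_le ha (hl x (by simp))) (fun y hy => hl y (by simp [hy]))

-- two lists with the same members have the same 0-seeded running max
theorem pvFoldlMax_congr (l₁ l₂ : List Int) (h : ∀ x, x ∈ l₁ ↔ x ∈ l₂) :
    l₁.foldl max 0 = l₂.foldl max 0 := by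
  refine le_antisymm ?_ ?_ <;>
    [ exact pvFoldlMax_le l₁ 0 _ (PySem.List.le_foldl_max l₂ 0).1
        (fun x hx => (PySem.List.le_foldl_max l₂ 0).2 x ((h x).mp hx));
      exact pvFoldlMax_le l₂ 0 _ (PySem.List.le_foldl_max l₁ 0).1
        (fun x hx => (PySem.List.le_foldl_max l₁ 0).2 x ((h x).mpr hx)) ]

-- B's index-dedup comprehension keeps exactly the first occurrences passing Q, i.e. filters set(l)
theorem pvEnumFilter (Q : String → Bool) (l : List String) :
    ((PySem.List.enumerate l).filter
        (fun p => ((PySem.List.index? l p.2).map (fun k => (k : Int)) == some p.1) && Q p.2)).map (fun p => p.2)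
      = (PySem.Set.ofList l).filter Q := by
  induction l using List.reverseRecOn with
  | nil => simp [PySem.List.enumerate, PySem.Set.ofList]
  | append_singleton l x ih =>
    rw [PySem.List.enumerate_append]
    have hcongr : (PySem.List.enumerate l).filter
        (fun p => ((PySem.List.index? (l ++ [x]) p.2).map (fun k => (k : Int)) == some p.1) && Q p.2)
      = (PySem.List.enumerate l).filter
        (fun p => ((PySem.List.index? l p.2).map (fun k => (k : Int)) == some p.1) && Q p.2) := by
      refine List.filter_congr (fun p hp => ?_)
      obtain ⟨k, hk, rfl⟩ := (PySem.List.mem_enumerate_iff l 0 p).mp hp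
      rw [PySem.List.index?_append_of_mem [x] (List.getElem_mem hk)]
    by_cases hx : x ∈ l
    · obtain ⟨j, hj⟩ : ∃ j, PySem.List.index? l x = some j :=
        Option.isSome_iff_exists.mp ((PySem.List.index?_isSome_iff l x).mpr hx)
      obtain ⟨hjlt, -, -⟩ := PySem.List.getElem_of_index?_eq_some hj
      have hpred : ((fun (p : Int × String) =>
            ((PySem.List.index? (l ++ [x]) p.2).map (fun k => (k : Int)) == some p.1) && Q p.2)
            ((0 : Int) + l.length, x)) = false := by
        beta_reduce
        rw [PySem.List.index?_append_of_mem [x] hx, hj]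
        simp
        omega
      have hset : PySem.Set.ofList (l ++ [x]) = PySem.Set.ofList l := by
        rw [PySem.Set.ofList_append_singleton, PySem.Set.add]
        simp [PySem.Set.contains, (PySem.Set.mem_ofList l x).mpr hx]
      rw [List.filter_append, List.map_append, hcongr, ih, hset]
      simp only [PySem.List.enumerate, List.filter_cons, List.filter_nil, hpred,
        Bool.false_eq_true, if_false, List.map_nil, List.append_nil]
    · have hj : PySem.List.index? (l ++ [x]) x = some l.length :=
        PySem.List.index?_append_singleton_self l x hx
      have hpred : ((fun (p : Int × String) =>
            ((PySem.List.index? (l ++ [x]) p.2).map (fun k => (k : Int)) == some p.1) && Q p.2)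
            ((0 : Int) + l.length, x)) = Q x := by
        beta_reduce
        rw [hj]
        simp
      have hset : PySem.Set.ofList (l ++ [x]) = PySem.Set.ofList l ++ [x] := by
        have hxn : x ∉ PySem.Set.ofList l := fun h => hx ((PySem.Set.mem_ofList l x).mp h)
        rw [PySem.Set.ofList_append_singleton, PySem.Set.add]
        simp [PySem.Set.contains, hxn]
      rw [List.filter_append, List.map_append, hcongr, ih, hset, List.filter_append]
      simp only [PySem.List.enumerate, List.filter_cons, List.filter_nil, hpred]
      by_cases hq : Q x = true <;> simp [hq]

-- ===== VERDICT (by name: the statement is the Claim_ definition above) =====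
theorem busy_cities_spec : Claim_equal_busy_cities := by
  intro sd _ _
  unfold Spec_busy_cities busy_cities
  set cs := sd.map pvCity with hcs
  have hB : busy_cities_alt sd =
      (if cs.isEmpty then ([] : List String)
       else
         match PySem.List.max? (cs.map (fun c => (cs.count c : Int))) id with
         | none => []
         | some m =>
           ((PySem.List.enumerate cs).filter
             (fun p => ((PySem.List.index? cs p.2).map (fun k => (k : Int)) == some p.1)
                       && ((cs.count p.2 : Int) == m))).map (fun p => p.2)) := rfl
  rw [hB]
  -- A's fold is pvStep over the counter's items
  have hitems : (PySem.Dict.counter cs).items =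
      (PySem.Set.ofList cs).map (fun k => (k, (List.count k cs : Int))) := PySem.Dict.items_counter cs
  have hlen : ∀ k, (((sd.map (fun d => (pvCity d, pvName d))).filter (fun p => p.1 == k)).map
      (fun p => p.2)).length = List.count k cs := by
    intro k
    rw [List.length_map, ← List.countP_eq_length_filter, List.count_eq_countP, hcs,
      List.countP_map, List.countP_map]
    rfl
  have hA : (group_by_city sd).items.map (fun p => (p.1, (p.2.length : Int)))
      = (PySem.Dict.counter cs).items := by
    rw [pvGroup_items, hitems, List.map_map]
    refine List.map_congr_left (fun k _ => ?_)
    simp [hlen k]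
  have hfold : List.foldl
      (fun (st : List String × Int) (p : String × List String) =>
        if (p.2.length : Int) > st.2 then ([p.1], (p.2.length : Int))
        else if ((p.2.length : Int) == st.2) then (st.1 ++ [p.1], st.2)
        else st)
      (([] : List String), (0 : Int)) (group_by_city sd).items
      = List.foldl pvStep (([] : List String), (0 : Int)) ((PySem.Dict.counter cs).items) := by
    rw [← hA, List.foldl_map]
    rfl
  have hpos : ∀ p ∈ (PySem.Dict.counter cs).items, 0 < p.2 := by
    intro p hp
    rw [hitems] at hp
    obtain ⟨k, hk, rfl⟩ := List.mem_map.mp hp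
    have : k ∈ cs := (PySem.Set.mem_ofList cs k).mp hk
    show (0 : Int) < (List.count k cs : Int)
    exact_mod_cast List.count_pos_iff.mpr this
  rw [hfold, pvLoop_eq _ hpos]
  -- both maxima are the 0-seeded running max of the per-occurrence counts
  have hMeq : pvM ((PySem.Dict.counter cs).items) = (cs.map (fun c => (cs.count c : Int))).foldl max 0 := by
    rw [pvM, hitems, List.map_map]
    refine pvFoldlMax_congr _ _ (fun x => ?_)
    simp only [List.mem_map, Function.comp_def, PySem.Set.mem_ofList]
  by_cases hemp : cs.isEmpty
  · rw [List.isEmpty_iff] at hemp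
    rw [hemp] at hitems ⊢
    simp [hitems]
  · have hne : cs ≠ [] := fun h => hemp (by rw [h]; rfl)
    obtain ⟨c0, rest, hc⟩ := List.exists_cons_of_ne_nil hne
    have hmax : PySem.List.max? (cs.map (fun c => (cs.count c : Int))) id
        = some (pvM ((PySem.Dict.counter cs).items)) := by
      have hpos0 : (0 : Int) < ((c0 :: rest).count c0 : Int) := by
        exact_mod_cast List.count_pos_iff.mpr List.mem_cons_self
      rw [hMeq]
      conv_lhs => rw [hc, List.map_cons]
      conv_rhs => rw [hc, List.map_cons]
      exact pvMax?_pos _ _ hpos0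
    rw [Bool.not_eq_true] at hemp
    rw [hemp, hmax]
    simp only [Bool.false_eq_true, if_false]
    rw [pvEnumFilter (fun c => ((cs.count c : Int) == pvM ((PySem.Dict.counter cs).items))) cs,
      hitems, List.filter_map, List.map_map]
    simp [Function.comp_def]

def busy_cities_raises : Claim_raises_busy_cities := by
  unfold Claim_raises_busy_cities
  refine ⟨?_, by decide⟩
  rintro sd _ ⟨_, rec, hrec, hname⟩ hpre
  exact hname (hpre rec hrec).2
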